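-- pv_equiv track=rewrite | github.com/amuletofyendor/decision-ledger | decision_ledger/wiki_export.py | _subject_prefixes
-- ===== SOURCE A (Python) =====
-- def _subject_prefixes(root_subject: str, subjects: list[str]) -> set[str]:
--     prefixes = {root_subject}
--     root_parts = root_subject.split(".")
--     for subject in subjects:
--         parts = subject.split(".")
--         for index in range(len(root_parts), len(parts) + 1):
--             prefixes.add(".".join(parts[:index]))
--     return prefixes
-- ===== SOURCE B (Python) =====
-- def _subject_prefixes(root_subject: str, subjects: list[str]) -> set[str]:
--     prefixes = {root_subject}
--     start = len(root_subject.split("."))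
--     for subject in subjects:
--         parts = subject.split(".")
--         if start <= len(parts):
--             current = ".".join(parts[:start])
--             prefixes.add(current)
--             for part in parts[start:]:
--                 current = current + "." + part
--                 prefixes.add(current)
--     return prefixes
-- ===== Notes on version B (the rewrite author's own statement) =====
-- stated objective: alternative
-- what changed: Instead of re-joining a slice parts[:index] for every index in range(len(root_parts), len(parts)+1), B builds the base prefix once and extends a running prefix string with one '.'+part per remaining component, guarded by an explicit start <= len(parts) test.
import Mathlib
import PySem

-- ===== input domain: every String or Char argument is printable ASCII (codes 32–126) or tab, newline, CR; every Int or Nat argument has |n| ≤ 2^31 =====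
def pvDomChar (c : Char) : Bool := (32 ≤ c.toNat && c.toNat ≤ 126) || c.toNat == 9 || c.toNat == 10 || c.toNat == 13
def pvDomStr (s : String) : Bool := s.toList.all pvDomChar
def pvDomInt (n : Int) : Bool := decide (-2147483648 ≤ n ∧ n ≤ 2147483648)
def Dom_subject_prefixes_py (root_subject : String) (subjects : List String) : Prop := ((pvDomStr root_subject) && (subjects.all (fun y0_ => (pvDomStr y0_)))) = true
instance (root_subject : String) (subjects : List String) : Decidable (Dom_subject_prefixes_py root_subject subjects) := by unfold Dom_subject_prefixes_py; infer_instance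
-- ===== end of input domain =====

-- B replaces A's re-slicing inner range loop by a running-prefix accumulator (same cost, different decomposition).


-- ===== PORT A =====
def subject_prefixes_py (root_subject : String) (subjects : List String) : List String :=
  let prefixes : PySem.Set String := PySem.Set.add PySem.Set.empty root_subject
  let root_parts := (PySem.Str.split? root_subject ".").getD []
  subjects.foldl (fun prefixes subject =>
    let parts := (PySem.Str.split? subject ".").getD []
    (PySem.List.pyRange (root_parts.length : Int) ((parts.length : Int) + 1) 1).foldl
      (fun prefixes index =>
        PySem.Set.add prefixes (PySem.Str.join "." (PySem.List.slice parts none (some index))))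
      prefixes) prefixes

-- ===== PORT B =====
def subject_prefixes_py_alt (root_subject : String) (subjects : List String) : List String :=
  let start := ((PySem.Str.split? root_subject ".").getD []).length
  subjects.foldl (fun prefixes subject =>
    let parts := (PySem.Str.split? subject ".").getD []
    if start ≤ parts.length then
      let current := PySem.Str.join "." (parts.take start)
      ((parts.drop start).foldl
        (fun (st : PySem.Set String × String) part =>
          let c := st.2 ++ "." ++ part
          (PySem.Set.add st.1 c, c))
        (PySem.Set.add prefixes current, current)).1
    else prefixes)
    (PySem.Set.add PySem.Set.empty root_subject)

-- ===== PRECONDITION & SPEC =====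
def Spec_subject_prefixes_py (root_subject : String) (subjects : List String) (out : List String) : Prop := out = subject_prefixes_py_alt root_subject subjects
instance (root_subject : String) (subjects : List String) (out : List String) : Decidable (Spec_subject_prefixes_py root_subject subjects out) := by unfold Spec_subject_prefixes_py; infer_instance

-- ===== CLAIM (what is proved, stated in full; the proofs are below) =====
def Claim_equal_subject_prefixes_py : Prop := ∀ (root_subject : String) (subjects : List String), Dom_subject_prefixes_py root_subject subjects → Spec_subject_prefixes_py root_subject subjects (subject_prefixes_py root_subject subjects)

-- ===== LEMMAS AND PROOFS =====

-- split always returns at least one piece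
lemma splitOn_go_ne_nil (sep : List Char) (fuel : Nat) (l cur : List Char)
    (acc : List (List Char)) : PySem.Chars.splitOn.go sep fuel l cur acc ≠ [] := by
  induction fuel generalizing l cur acc with
  | zero => simp [PySem.Chars.splitOn.go]
  | succ n ih =>
    cases l with
    | nil => simp [PySem.Chars.splitOn.go]
    | cons c rest =>
      simp only [PySem.Chars.splitOn.go]
      split
      · exact ih _ _ _
      · exact ih _ _ _

lemma split_len_pos (s : String) : 0 < ((PySem.Str.split? s ".").getD []).length := by
  have hmap := PySem.Str.split?_map s "."
  have hchars : PySem.Chars.split? s.toList ".".toList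
      = some (PySem.Chars.splitOn s.toList ['.']) := by
    simp [PySem.Chars.split?]
  rw [hchars] at hmap
  cases h : PySem.Str.split? s "." with
  | none => rw [h] at hmap; simp at hmap
  | some l =>
    rw [h] at hmap
    simp only [Option.map_some, Option.some.injEq] at hmap
    have hlen : l.length = (PySem.Chars.splitOn s.toList ['.']).length := by
      rw [← hmap, List.length_map]
    have hne : PySem.Chars.splitOn s.toList ['.'] ≠ [] := by
      simp only [PySem.Chars.splitOn]
      exact splitOn_go_ne_nil ['.'] (s.toList.length + 1) s.toList [] []
    have hlp : (PySem.Chars.splitOn s.toList ['.']).length ≠ 0 := by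
      intro h0
      exact hne (List.eq_nil_of_length_eq_zero h0)
    simp only [Option.getD_some]
    omega

lemma chars_join_cons_ne (sep p : List Char) (l : List (List Char)) (h : l ≠ []) :
    PySem.Chars.join sep (p :: l) = p ++ sep ++ PySem.Chars.join sep l := by
  cases l with
  | nil => exact absurd rfl h
  | cons q rest => exact PySem.Chars.join_cons_cons sep p q rest

lemma chars_join_concat (sep y : List Char) (xs : List (List Char)) (h : xs ≠ []) :
    PySem.Chars.join sep (xs ++ [y]) = PySem.Chars.join sep xs ++ sep ++ y := by
  induction xs with
  | nil => exact absurd rfl h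
  | cons a t ih =>
    by_cases ht : t = []
    · subst ht
      simp [PySem.Chars.join_cons_cons, PySem.Chars.join_singleton]
    · rw [List.cons_append, chars_join_cons_ne sep a (t ++ [y]) (by simp), ih ht,
        chars_join_cons_ne sep a t ht]
      simp [List.append_assoc]

lemma str_join_concat (y : String) (xs : List String) (h : xs ≠ []) :
    PySem.Str.join "." (xs ++ [y]) = PySem.Str.join "." xs ++ "." ++ y := by
  apply String.toList_inj.mp
  simp only [PySem.Str.toList_join, String.toList_append, List.map_append, List.map_cons,
    List.map_nil]
  exact chars_join_concat ".".toList y.toList (xs.map String.toList) (by simpa using h)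

lemma join_take_succ (parts : List String) (i : Nat) (h1 : 1 ≤ i) (h2 : i < parts.length) :
    PySem.Str.join "." (parts.take (i + 1))
      = PySem.Str.join "." (parts.take i) ++ "." ++ parts[i] := by
  rw [List.take_add_one, List.getElem?_eq_getElem h2]
  exact str_join_concat _ _ (by
    intro hnil
    have hl := congrArg List.length hnil
    simp only [List.length_take, List.length_nil] at hl
    omega)

-- the inner loops agree: A's range-of-slices fold equals B's running-prefix fold
lemma inner_eq (parts : List String) (n : Nat) :
    ∀ (i : Nat) (s : PySem.Set String), 1 ≤ i → i + n = parts.length →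
    (PySem.List.pyRange (i : Int) ((parts.length : Int) + 1) 1).foldl
        (fun pre index =>
          PySem.Set.add pre (PySem.Str.join "." (PySem.List.slice parts none (some index)))) s
      = ((parts.drop i).foldl
          (fun (st : PySem.Set String × String) part =>
            (PySem.Set.add st.1 (st.2 ++ "." ++ part), st.2 ++ "." ++ part))
          (PySem.Set.add s (PySem.Str.join "." (parts.take i)),
            PySem.Str.join "." (parts.take i))).1 := by
  induction n with
  | zero =>
    intro i s h1 hlen
    have hi : i = parts.length := by omega
    subst hi
    rw [PySem.List.pyRange_one_cons (by omega)]
    have hempty : PySem.List.pyRange ((parts.length : Int) + 1) ((parts.length : Int) + 1) 1 = [] := by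
      simp [PySem.List.pyRange]
    rw [hempty]
    simp [PySem.List.slice_to_natCast, List.drop_length, List.take_length]
  | succ n ih =>
    intro i s h1 hlen
    have hlt : i < parts.length := by omega
    rw [PySem.List.pyRange_one_cons (by omega)]
    have hcast : (i : Int) + 1 = ((i + 1 : Nat) : Int) := by push_cast; ring
    rw [List.foldl_cons, hcast, ih (i + 1) _ (by omega) (by omega)]
    rw [List.drop_eq_getElem_cons hlt, List.foldl_cons]
    simp only [PySem.List.slice_to_natCast, join_take_succ parts i h1 hlt]

-- the two per-subject step functions agree
lemma step_eq (start : Nat) (hstart : 1 ≤ start) (s : PySem.Set String) (subject : String) :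
    (PySem.List.pyRange (start : Int)
        (((((PySem.Str.split? subject ".").getD []).length : Int)) + 1) 1).foldl
      (fun pre index =>
        PySem.Set.add pre
          (PySem.Str.join "." (PySem.List.slice ((PySem.Str.split? subject ".").getD []) none (some index)))) s
    = (if start ≤ ((PySem.Str.split? subject ".").getD []).length then
        ((((PySem.Str.split? subject ".").getD []).drop start).foldl
          (fun (st : PySem.Set String × String) part =>
            (PySem.Set.add st.1 (st.2 ++ "." ++ part), st.2 ++ "." ++ part))
          (PySem.Set.add s (PySem.Str.join "." (((PySem.Str.split? subject ".").getD []).take start)),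
            PySem.Str.join "." (((PySem.Str.split? subject ".").getD []).take start))).1
      else s) := by
  set parts := (PySem.Str.split? subject ".").getD [] with hp
  by_cases hle : start ≤ parts.length
  · rw [if_pos hle]
    exact inner_eq parts (parts.length - start) start s hstart (by omega)
  · rw [if_neg hle]
    have hnlt : ¬ ((start : Int) < (parts.length : Int) + 1) := by omega
    have hempty : PySem.List.pyRange (start : Int) ((parts.length : Int) + 1) 1 = [] := by
      simp [PySem.List.pyRange, hnlt]
    rw [hempty, List.foldl_nil]

-- ===== VERDICT (by name: the statement is the Claim_ definition above) =====
theorem subject_prefixes_py_spec : Claim_equal_subject_prefixes_py := by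
  intro root_subject subjects _
  unfold Spec_subject_prefixes_py
  simp only [subject_prefixes_py, subject_prefixes_py_alt]
  congr 1
  funext s subj
  exact step_eq ((PySem.Str.split? root_subject ".").getD []).length
    (split_len_pos root_subject) s subj
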